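-- pv_equiv track=rewrite | github.com/RugvedR/LeetCode-Practice-solutions | Good Stones - GFG/good-stones.py | goodStones
-- ===== SOURCE A (Python) =====
-- def goodStones(n, arr) -> int:
--    #code here
--    def good(arr,n,dp,i,ans,vis):
--
--        if i>=n or i<0:
--
--            return True
--
--        if dp[i]==True:
--
--            return True
--
--        if dp[i]==2000:
--
--            return False
--
--        if i in vis:
--
--            dp[i]=2000
--
--            return False
--
--        vis.add(i)
--
--        if good(arr,n,dp,i+arr[i],ans,vis):
--
--            ans[0]+=1
--
--            dp[i]=True
--
--            return True
--
--        else: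
--
--            dp[i]=2000
--
--            return False
--
--
--
--    dp=[False for i in range(n)]
--
--    vis=set()
--
--    ans=[0]
--
--    for i in range(n):
--
--        if i in vis:
--
--            continue
--
--        vis.add(i)
--
--        if good(arr,n,dp,i+arr[i],ans,vis):
--
--            ans[0]+=1
--
--            dp[i]=True
--
--        else:
--
--            dp[i]=2000
--
--    return ans[0]
-- ===== SOURCE B (Python) =====
-- def goodStones(n, arr) -> int:
--     # Count stones whose jump chain exits [0, n).  For each start, follow the
--     # deterministic chain for at most n steps: a chain that exits does so within
--     # n steps (all in-range states on an exiting chain are distinct), so if we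
--     # are still in range after n steps the chain is cyclic and the stone is bad.
--     count = 0
--     for i in range(n):
--         j = i + arr[i]
--         for _ in range(n):
--             if j < 0 or j >= n:
--                 break
--             j += arr[j]
--         if j < 0 or j >= n:
--             count += 1
--     return count
-- ===== Notes on version B (the rewrite author's own statement) =====
-- stated objective: simpler
-- what changed: Replaced A's memoized recursive DFS (shared dp table, visited set and answer cell threaded through a nested closure) by a direct per-stone forward simulation: follow each stone's deterministic jump chain for at most n steps (an exiting chain visits distinct in-range cells, so n steps suffice) and count the chains that leave [0, n).
import Mathlib
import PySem

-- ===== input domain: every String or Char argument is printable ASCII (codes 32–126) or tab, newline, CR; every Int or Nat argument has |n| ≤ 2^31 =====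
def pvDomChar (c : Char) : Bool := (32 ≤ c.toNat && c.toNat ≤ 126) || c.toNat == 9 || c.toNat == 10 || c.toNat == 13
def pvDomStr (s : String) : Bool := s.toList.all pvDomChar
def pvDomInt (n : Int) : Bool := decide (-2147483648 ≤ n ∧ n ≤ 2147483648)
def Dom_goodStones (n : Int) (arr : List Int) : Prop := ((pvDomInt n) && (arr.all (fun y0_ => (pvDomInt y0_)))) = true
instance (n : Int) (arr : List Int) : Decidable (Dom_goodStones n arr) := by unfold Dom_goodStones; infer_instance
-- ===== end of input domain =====

-- B replaces A's memoized recursive DFS by a bounded forward simulation of each jump chain (simpler, not faster); return values agree on Pre_.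

-- ===== PORT A =====
-- Python's dp holds False/True/2000; encoded here as 0/1/2000 (the code only tests dp[i]==True and dp[i]==2000,
-- which for these values is exactly =1 and =2000). arr[i] is ported as pyGetD arr i 0: under Pre_ the index is
-- always in range, so the default is never used (outside Pre_ Python raises IndexError).
-- The nested Python function good(arr,n,dp,i,ans,vis) mutates dp/ans/vis; ported with the state threaded
-- explicitly and a fuel argument: Python's recursion inserts a fresh index of [0,n) into vis before every
-- nested call, so depth never exceeds n+1 and fuel n.toNat+1 is never exhausted (proved inside goodA_post).
def goodA (arr : List Int) (n : Int) :
    Nat → Int → List Int × PySem.Set Int × Int → Bool × (List Int × PySem.Set Int × Int)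
  | 0, _, st => (false, st)
  | Nat.succ fuel, i, (dp, vis, ans) =>
      if n ≤ i ∨ i < 0 then (true, (dp, vis, ans))
      else if PySem.List.pyGetD dp i 0 = 1 then (true, (dp, vis, ans))
      else if PySem.List.pyGetD dp i 0 = 2000 then (false, (dp, vis, ans))
      else if PySem.Set.contains vis i then (false, (PySem.List.pySetD dp i 2000, vis, ans))
      else
        match goodA arr n fuel (i + PySem.List.pyGetD arr i 0) (dp, PySem.Set.add vis i, ans) with
        | (true, (dp', vis', ans')) => (true, (PySem.List.pySetD dp' i 1, vis', ans' + 1))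
        | (false, (dp', vis', ans')) => (false, (PySem.List.pySetD dp' i 2000, vis', ans'))

def goodStones (n : Int) (arr : List Int) : Int :=
  let st0 : List Int × PySem.Set Int × Int :=
    ((PySem.List.pyRange 0 n 1).map (fun _ => (0 : Int)), PySem.Set.empty, 0)
  let st := (PySem.List.pyRange 0 n 1).foldl (fun st i =>
      match st with
      | (dp, vis, ans) =>
        if PySem.Set.contains vis i then (dp, vis, ans)
        else
          match goodA arr n (n.toNat + 1) (i + PySem.List.pyGetD arr i 0) (dp, PySem.Set.add vis i, ans) with
          | (true, (dp', vis', ans')) => (PySem.List.pySetD dp' i 1, vis', ans' + 1)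
          | (false, (dp', vis', ans')) => (PySem.List.pySetD dp' i 2000, vis', ans')) st0
  st.2.2

-- ===== PORT B =====
-- inner loop 'for _ in range(n): if j out of range: break; j += arr[j]' — the break leaves j unchanged for the
-- remaining iterations, so it is the structural recursion below.
def chaseB (n : Int) (arr : List Int) : Nat → Int → Int
  | 0, j => j
  | Nat.succ k, j => if j < 0 ∨ n ≤ j then j else chaseB n arr k (j + PySem.List.pyGetD arr j 0)

def goodStones_alt (n : Int) (arr : List Int) : Int :=
  (PySem.List.pyRange 0 n 1).foldl (fun count i =>
    let j := chaseB n arr n.toNat (i + PySem.List.pyGetD arr i 0)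
    if j < 0 ∨ n ≤ j then count + 1 else count) 0

-- ===== PRECONDITION & SPEC =====
-- Pre_ excludes exactly the inputs with n > len(arr): there the Python A (and B) raises IndexError on arr[i].
def Pre_goodStones (n : Int) (arr : List Int) : Prop := n ≤ (arr.length : Int)
instance (n : Int) (arr : List Int) : Decidable (Pre_goodStones n arr) := by
  unfold Pre_goodStones; infer_instance

def pvWitness_goodStones : Int × List Int := (3, [1, -5, 2])

def Spec_goodStones (n : Int) (arr : List Int) (out : Int) : Prop := out = goodStones_alt n arr
instance (n : Int) (arr : List Int) (out : Int) : Decidable (Spec_goodStones n arr out) := by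
  unfold Spec_goodStones; infer_instance

-- ===== CLAIM (what is proved, stated in full; the proofs are below) =====
def Claim_equal_goodStones : Prop := ∀ (n : Int) (arr : List Int), Dom_goodStones n arr →
  Pre_goodStones n arr → Spec_goodStones n arr (goodStones n arr)

-- ===== LEMMAS AND PROOFS =====

-- the deterministic jump map, absorbing outside [0,n)
def gstepG (n : Int) (arr : List Int) (j : Int) : Int :=
  if j < 0 ∨ n ≤ j then j else j + PySem.List.pyGetD arr j 0

def inRangeG (n j : Int) : Prop := 0 ≤ j ∧ j < n

-- "the chain from j eventually leaves [0,n)" — the semantic meaning of A's good() and of B's test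
def ExitsP (n : Int) (arr : List Int) (j : Int) : Prop :=
  ∃ k : Nat, ¬ inRangeG n ((gstepG n arr)^[k] j)

def dpAt (dp : List Int) (j : Int) : Int := PySem.List.pyGetD dp j 0

lemma gstep_out (n : Int) (arr : List Int) (j : Int) (h : ¬ inRangeG n j) :
    gstepG n arr j = j := by
  unfold inRangeG at h; unfold gstepG; rw [if_pos (by omega)]

lemma iterate_out (n : Int) (arr : List Int) (j : Int) (h : ¬ inRangeG n j) (k : Nat) :
    (gstepG n arr)^[k] j = j :=
  Function.iterate_fixed (gstep_out n arr j h) k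

lemma exits_gstep (n : Int) (arr : List Int) (i : Int) :
    ExitsP n arr i ↔ ExitsP n arr (gstepG n arr i) := by
  constructor
  · rintro ⟨k, hk⟩
    cases k with
    | zero =>
      refine ⟨0, ?_⟩
      simp only [Function.iterate_zero_apply] at hk ⊢
      rwa [gstep_out n arr i hk]
    | succ k => exact ⟨k, by rwa [← Function.iterate_succ_apply]⟩
  · rintro ⟨k, hk⟩
    exact ⟨k + 1, by rwa [Function.iterate_succ_apply]⟩

lemma no_exit_of_cycle (n : Int) (arr : List Int) (j : Int) (m : Nat) (hm : 0 < m)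
    (hj : inRangeG n j) (hcyc : (gstepG n arr)^[m] j = j) : ¬ ExitsP n arr j := by
  rintro ⟨k, hk⟩
  have hfix : ∀ a : Nat, (gstepG n arr)^[m * a] j = j := by
    intro a
    rw [Function.iterate_mul]
    exact Function.iterate_fixed hcyc a
  have hper : (gstepG n arr)^[k] j = (gstepG n arr)^[k % m] j := by
    conv_lhs => rw [← Nat.mod_add_div k m]
    rw [Function.iterate_add_apply, hfix]
  rw [hper] at hk
  rcases Nat.eq_zero_or_pos (k % m) with hr | hr
  · rw [hr, Function.iterate_zero_apply] at hk
    exact hk hj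
  · have hlt : k % m < m := Nat.mod_lt k hm
    have h1 : (gstepG n arr)^[(m - k % m) + k % m] j =
        (gstepG n arr)^[m - k % m] ((gstepG n arr)^[k % m] j) :=
      Function.iterate_add_apply _ _ _ _
    rw [show (m - k % m) + k % m = m from by omega] at h1
    rw [iterate_out n arr _ hk, hcyc] at h1
    rw [← h1] at hk
    exact hk hj

lemma exits_iff_bounded (n : Int) (arr : List Int) (j : Int) :
    ExitsP n arr j ↔ ¬ inRangeG n ((gstepG n arr)^[n.toNat] j) := by
  constructor
  · intro hex
    haveI : DecidablePred (fun k : Nat => ¬ inRangeG n ((gstepG n arr)^[k] j)) := by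
      intro k; unfold inRangeG; infer_instance
    set K := Nat.find hex with hKdef
    have hK : ¬ inRangeG n ((gstepG n arr)^[K] j) := Nat.find_spec hex
    have hmin : ∀ t, t < K → inRangeG n ((gstepG n arr)^[t] j) := by
      intro t ht
      have := Nat.find_min hex ht
      exact not_not.mp this
    have hnodup : ∀ a b : Nat, a < b → b < K →
        (gstepG n arr)^[a] j ≠ (gstepG n arr)^[b] j := by
      intro a b hab hbK heq
      have h2 : (gstepG n arr)^[K] j = (gstepG n arr)^[(K - b) + a] j := by
        have e1 : (gstepG n arr)^[(K - b) + b] j =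
            (gstepG n arr)^[K - b] ((gstepG n arr)^[b] j) := Function.iterate_add_apply _ _ _ _
        have e2 : (gstepG n arr)^[(K - b) + a] j =
            (gstepG n arr)^[K - b] ((gstepG n arr)^[a] j) := Function.iterate_add_apply _ _ _ _
        rw [show (K - b) + b = K from by omega] at e1
        rw [e1, e2, heq]
      have := hmin ((K - b) + a) (by omega)
      rw [← h2] at this
      exact hK this
    have hKle : K ≤ n.toNat := by
      by_contra hgt
      have hgt' : n.toNat < K := by omega
      have hmaps : ∀ t ∈ Finset.range K, (gstepG n arr)^[t] j ∈ Finset.Ico (0 : Int) n := by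
        intro t ht
        have := hmin t (Finset.mem_range.mp ht)
        unfold inRangeG at this
        simp only [Finset.mem_Ico]
        exact this
      have hcard : (Finset.Ico (0 : Int) n).card < (Finset.range K).card := by
        rw [Int.card_Ico, Finset.card_range]
        omega

      obtain ⟨a, ha, b, hb, hne, heq⟩ :=
        Finset.exists_ne_map_eq_of_card_lt_of_maps_to hcard hmaps
      rcases Nat.lt_or_ge a b with h | h
      · exact hnodup a b h (Finset.mem_range.mp hb) heq
      · have h' : b < a := by omega
        exact hnodup b a h' (Finset.mem_range.mp ha) heq.symm
    have e : (gstepG n arr)^[(n.toNat - K) + K] j =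
        (gstepG n arr)^[n.toNat - K] ((gstepG n arr)^[K] j) := Function.iterate_add_apply _ _ _ _
    rw [show (n.toNat - K) + K = n.toNat from by omega] at e
    rw [e, iterate_out n arr _ hK]
    exact hK
  · intro h
    exact ⟨n.toNat, h⟩

lemma chase_eq_iter (n : Int) (arr : List Int) :
    ∀ (k : Nat) (j : Int), chaseB n arr k j = (gstepG n arr)^[k] j := by
  intro k
  induction k with
  | zero => intro j; rfl
  | succ k ih =>
    intro j
    by_cases h : j < 0 ∨ n ≤ j
    · rw [chaseB, if_pos h]
      rw [iterate_out n arr j (by unfold inRangeG; omega)]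
    · rw [chaseB, if_neg h, ih, Function.iterate_succ_apply]
      congr 1
      rw [gstepG, if_neg h]

-- call chains of A's recursion: ChainG P i means P = [p0,…,pm] with each pt in range,
-- gstep pt = p(t+1) and gstep pm = i
inductive ChainG (n : Int) (arr : List Int) : List Int → Int → Prop
  | nil (i : Int) : ChainG n arr [] i
  | single (p i : Int) : inRangeG n p → gstepG n arr p = i → ChainG n arr [p] i
  | cons (p q : Int) (P : List Int) (i : Int) : inRangeG n p → gstepG n arr p = q →
      ChainG n arr (q :: P) i → ChainG n arr (p :: q :: P) i

lemma chain_snoc (n : Int) (arr : List Int) (P : List Int) (i : Int)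
    (h : ChainG n arr P i) :
    inRangeG n i → ChainG n arr (P ++ [i]) (gstepG n arr i) := by
  induction h with
  | nil j =>
    intro hj
    exact ChainG.single j (gstepG n arr j) hj rfl
  | single p j hp hg =>
    intro hj
    exact ChainG.cons p j [] (gstepG n arr j) hp hg (ChainG.single j _ hj rfl)
  | cons p q P j hp hg hch ih =>
    intro hj
    exact ChainG.cons p q (P ++ [j]) (gstepG n arr j) hp hg (ih hj)

lemma chain_mem_iter (n : Int) (arr : List Int) (P : List Int) (i : Int)
    (h : ChainG n arr P i) : ∀ p ∈ P, ∃ m : Nat, 0 < m ∧ (gstepG n arr)^[m] p = i := by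
  induction h with
  | nil j => intro p hp; simp at hp
  | single p j hp hg =>
    intro x hx
    simp only [List.mem_singleton] at hx
    subst hx
    exact ⟨1, Nat.one_pos, by simpa using hg⟩
  | cons p q P j hp hg hch ih =>
    intro x hx
    rcases List.mem_cons.mp hx with rfl | hx'
    · obtain ⟨m, hm, hit⟩ := ih q (List.mem_cons_self)
      exact ⟨m + 1, by omega, by rw [Function.iterate_succ_apply, hg]; exact hit⟩
    · exact ih x hx'

lemma dpAt_set (dp : List Int) (i j v : Int) (hi : 0 ≤ i) (hj : 0 ≤ j)
    (hilen : i.toNat < dp.length) :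
    dpAt (dp.set i.toNat v) j = if j = i then v else dpAt dp j := by
  obtain ⟨a, rfl⟩ : ∃ a : Nat, i = (a : Int) := ⟨i.toNat, (Int.toNat_of_nonneg hi).symm⟩
  obtain ⟨b, rfl⟩ : ∃ b : Nat, j = (b : Int) := ⟨j.toNat, (Int.toNat_of_nonneg hj).symm⟩
  simp only [Int.toNat_natCast] at hilen ⊢
  unfold dpAt
  rw [PySem.List.pyGetD_natCast, PySem.List.pyGetD_natCast]
  by_cases hab : b = a
  · subst hab
    simp [List.getD_eq_getElem?_getD, hilen]
  · have : ¬ ((b : Int) = (a : Int)) := by exact_mod_cast hab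
    rw [if_neg this]
    simp [List.getD_eq_getElem?_getD, Ne.symm hab]

lemma countP_bump (l : List Int) (p p' : Int → Bool) (i : Int) (hnd : l.Nodup) (hi : i ∈ l)
    (hsame : ∀ j ∈ l, j ≠ i → p' j = p j) (hold : p i = false) (hnew : p' i = true) :
    l.countP p' = l.countP p + 1 := by
  induction l with
  | nil => simp at hi
  | cons a l ih =>
    rw [List.nodup_cons] at hnd
    rcases List.mem_cons.mp hi with rfl | hi'
    · have hcong : l.countP p' = l.countP p := by
        apply List.countP_congr
        intro x hx
        rw [hsame x (List.mem_cons_of_mem _ hx) (fun h => hnd.1 (h ▸ hx))]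
      rw [List.countP_cons, List.countP_cons, hcong, hnew, hold]
      simp
    · have hne : a ≠ i := fun h => hnd.1 (h ▸ hi')
      rw [List.countP_cons, List.countP_cons,
        ih hnd.2 hi' (fun j hj => hsame j (List.mem_cons_of_mem _ hj)),
        hsame a List.mem_cons_self hne]
      omega

lemma nodup_length_le (n : Int) (vis : List Int) (hnd : vis.Nodup)
    (hR : ∀ j ∈ vis, inRangeG n j) : vis.length ≤ n.toNat := by
  have h1 : vis.toFinset.card = vis.length := List.toFinset_card_of_nodup hnd
  have h2 : vis.toFinset ⊆ Finset.Ico (0 : Int) n := by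
    intro j hj
    have := hR j (List.mem_toFinset.mp hj)
    unfold inRangeG at this
    simp only [Finset.mem_Ico]
    exact this
  have := Finset.card_le_card h2
  rw [h1, Int.card_Ico] at this
  omega

-- the invariant A's mutable state satisfies
structure InvS (n : Int) (arr : List Int) (dp : List Int) (vis : PySem.Set Int) (ans : Int) :
    Prop where
  len : dp.length = n.toNat
  nodup : vis.Nodup
  visR : ∀ j ∈ vis, inRangeG n j
  tri : ∀ j, inRangeG n j → dpAt dp j = 0 ∨ dpAt dp j = 1 ∨ dpAt dp j = 2000
  one : ∀ j, inRangeG n j → dpAt dp j = 1 → ExitsP n arr j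
  bad : ∀ j, inRangeG n j → dpAt dp j = 2000 → ¬ ExitsP n arr j
  cnt : ans = (((PySem.List.pyRange 0 n 1).countP (fun j => dpAt dp j == 1) : Nat) : Int)

lemma dpAt_pySetD (dp : List Int) (i j v : Int) (h0 : 0 ≤ i) (hilen : i.toNat < dp.length)
    (hj : 0 ≤ j) :
    dpAt (PySem.List.pySetD dp i v) j = if j = i then v else dpAt dp j := by
  rw [PySem.List.pySetD_of_nonneg dp v h0]
  exact dpAt_set dp i j v h0 hj hilen

lemma InvS_set_one (n : Int) (arr : List Int) (dp : List Int) (vis : PySem.Set Int) (ans : Int)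
    (i : Int) (hInv : InvS n arr dp vis ans) (hin : inRangeG n i) (hi0 : dpAt dp i = 0)
    (hex : ExitsP n arr i) : InvS n arr (PySem.List.pySetD dp i 1) vis (ans + 1) := by
  have hilen : i.toNat < dp.length := by
    rw [hInv.len]
    unfold inRangeG at hin
    omega
  have hat : ∀ j : Int, 0 ≤ j →
      dpAt (PySem.List.pySetD dp i 1) j = if j = i then 1 else dpAt dp j :=
    fun j hj => dpAt_pySetD dp i j 1 hin.1 hilen hj
  refine ⟨by rw [PySem.List.pySetD_of_nonneg dp 1 hin.1]; simp [hInv.len],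
    hInv.nodup, hInv.visR, ?_, ?_, ?_, ?_⟩
  · intro j hj
    rw [hat j hj.1]
    split_ifs with h
    · right; left; rfl
    · exact hInv.tri j hj
  · intro j hj h1
    rw [hat j hj.1] at h1
    split_ifs at h1 with h
    · subst h; exact hex
    · exact hInv.one j hj h1
  · intro j hj h1
    rw [hat j hj.1] at h1
    split_ifs at h1 with h
    · omega
    · exact hInv.bad j hj h1
  · have hbump : (PySem.List.pyRange 0 n 1).countP
        (fun j => dpAt (PySem.List.pySetD dp i 1) j == 1) =
        (PySem.List.pyRange 0 n 1).countP (fun j => dpAt dp j == 1) + 1 := by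
      apply countP_bump _ _ _ i (PySem.List.nodup_pyRange_one 0 n)
        (PySem.List.mem_pyRange_one.mpr ⟨hin.1, hin.2⟩)
      · intro j hj hne
        have hj' := PySem.List.mem_pyRange_one.mp hj
        rw [hat j hj'.1, if_neg hne]
      · rw [hi0]
        simp
      · rw [hat i hin.1, if_pos rfl]
        simp
    rw [hbump, hInv.cnt]
    push_cast
    ring

lemma InvS_set_bad (n : Int) (arr : List Int) (dp : List Int) (vis : PySem.Set Int) (ans : Int)
    (i : Int) (hInv : InvS n arr dp vis ans) (hin : inRangeG n i)
    (hi0 : dpAt dp i = 0 ∨ dpAt dp i = 2000) (hnex : ¬ ExitsP n arr i) :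
    InvS n arr (PySem.List.pySetD dp i 2000) vis ans := by
  have hilen : i.toNat < dp.length := by
    rw [hInv.len]
    unfold inRangeG at hin
    omega
  have hat : ∀ j : Int, 0 ≤ j →
      dpAt (PySem.List.pySetD dp i 2000) j = if j = i then 2000 else dpAt dp j :=
    fun j hj => dpAt_pySetD dp i j 2000 hin.1 hilen hj
  refine ⟨by rw [PySem.List.pySetD_of_nonneg dp 2000 hin.1]; simp [hInv.len],
    hInv.nodup, hInv.visR, ?_, ?_, ?_, ?_⟩
  · intro j hj
    rw [hat j hj.1]
    split_ifs with h
    · right; right; rfl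
    · exact hInv.tri j hj
  · intro j hj h1
    rw [hat j hj.1] at h1
    split_ifs at h1 with h
    · omega
    · exact hInv.one j hj h1
  · intro j hj h1
    rw [hat j hj.1] at h1
    split_ifs at h1 with h
    · subst h; exact hnex
    · exact hInv.bad j hj h1
  · rw [hInv.cnt]
    congr 1
    apply List.countP_congr
    intro x hx
    have hx' := PySem.List.mem_pyRange_one.mp hx
    rw [hat x hx'.1]
    split_ifs with h
    · subst h
      rcases hi0 with h1 | h1
      · rw [h1]
        simp
      · rw [h1]
    · rfl

def PostG (n : Int) (arr : List Int) (P : List Int) (vis : PySem.Set Int) (i : Int)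
    (r : Bool × (List Int × PySem.Set Int × Int)) : Prop :=
  (r.1 = true ↔ ExitsP n arr i) ∧
  InvS n arr r.2.1 r.2.2.1 r.2.2.2 ∧
  (∀ j ∈ r.2.2.1, dpAt r.2.1 j ≠ 0 ∨ j ∈ P) ∧
  (∀ j, inRangeG n j → dpAt r.2.1 j ≠ 0 → j ∈ r.2.2.1) ∧
  (∀ p ∈ P, dpAt r.2.1 p = 0 ∨ dpAt r.2.1 p = 2000) ∧
  (r.1 = true → ∀ p ∈ P, dpAt r.2.1 p = 0) ∧
  (∀ j ∈ vis, j ∈ r.2.2.1)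

lemma goodA_post (n : Int) (arr : List Int) :
    ∀ (fuel : Nat) (i : Int) (dp : List Int) (vis : PySem.Set Int) (ans : Int) (P : List Int),
    InvS n arr dp vis ans →
    ChainG n arr P i →
    (∀ p ∈ P, p ∈ vis ∧ dpAt dp p = 0) →
    (∀ j ∈ vis, dpAt dp j ≠ 0 ∨ j ∈ P) →
    (∀ j, inRangeG n j → dpAt dp j ≠ 0 → j ∈ vis) →
    n.toNat + 1 ≤ fuel + vis.length →
    PostG n arr P vis i (goodA arr n fuel i (dp, vis, ans)) := by
  intro fuel
  induction fuel with
  | zero =>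
    intro i dp vis ans P hInv hch hP hvis hdec hfuel
    exfalso
    have := nodup_length_le n vis hInv.nodup hInv.visR
    omega
  | succ fuel ih =>
    intro i dp vis ans P hInv hch hP hvis hdec hfuel
    by_cases c1 : n ≤ i ∨ i < 0
    · -- out of range: return True
      have hgA : goodA arr n (Nat.succ fuel) i (dp, vis, ans) = (true, (dp, vis, ans)) := by
        simp only [goodA]
        rw [if_pos c1]
      rw [hgA]
      have hex : ExitsP n arr i :=
        ⟨0, by rw [Function.iterate_zero_apply]; unfold inRangeG; omega⟩
      exact ⟨⟨fun _ => hex, fun _ => rfl⟩, hInv, hvis, hdec,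
        fun p hp => Or.inl (hP p hp).2, fun _ p hp => (hP p hp).2, fun j hj => hj⟩
    · have hin : inRangeG n i := by unfold inRangeG; omega
      by_cases c2 : PySem.List.pyGetD dp i 0 = 1
      · -- dp[i] == True
        have hgA : goodA arr n (Nat.succ fuel) i (dp, vis, ans) = (true, (dp, vis, ans)) := by
          simp only [goodA]
          rw [if_neg c1, if_pos c2]
        rw [hgA]
        have hex : ExitsP n arr i := hInv.one i hin c2
        exact ⟨⟨fun _ => hex, fun _ => rfl⟩, hInv, hvis, hdec,
          fun p hp => Or.inl (hP p hp).2, fun _ p hp => (hP p hp).2, fun j hj => hj⟩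
      · by_cases c3 : PySem.List.pyGetD dp i 0 = 2000
        · -- dp[i] == 2000
          have hgA : goodA arr n (Nat.succ fuel) i (dp, vis, ans) = (false, (dp, vis, ans)) := by
            simp only [goodA]
            rw [if_neg c1, if_neg c2, if_pos c3]
          rw [hgA]
          have hnex : ¬ ExitsP n arr i := hInv.bad i hin c3
          exact ⟨⟨fun h => absurd h (by simp), fun h => absurd h hnex⟩, hInv, hvis, hdec,
            fun p hp => Or.inl (hP p hp).2, fun h => absurd h (by simp), fun j hj => hj⟩
        · have hd0 : dpAt dp i = 0 := by
            rcases hInv.tri i hin with h | h | h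
            · exact h
            · exact absurd h c2
            · exact absurd h c3
          have hilen : i.toNat < dp.length := by
            rw [hInv.len]
            unfold inRangeG at hin
            omega
          by_cases c4 : PySem.Set.contains vis i = true
          · -- i in vis and undecided: i lies on the current call chain, a cycle
            have hivis : i ∈ vis := (PySem.Set.contains_iff vis i).mp c4
            have hiP : i ∈ P := (hvis i hivis).resolve_left (fun h => h hd0)
            obtain ⟨m, hm, hit⟩ := chain_mem_iter n arr P i hch i hiP
            have hnex : ¬ ExitsP n arr i := no_exit_of_cycle n arr i m hm hin hit
            have hgA : goodA arr n (Nat.succ fuel) i (dp, vis, ans) =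
                (false, (PySem.List.pySetD dp i 2000, vis, ans)) := by
              simp only [goodA]
              rw [if_neg c1, if_neg c2, if_neg c3, if_pos c4]
            rw [hgA]
            unfold PostG
            dsimp only
            have hset : PySem.List.pySetD dp i 2000 = dp.set i.toNat 2000 :=
              PySem.List.pySetD_of_nonneg dp 2000 hin.1
            have hat : ∀ j : Int, 0 ≤ j →
                dpAt (PySem.List.pySetD dp i 2000) j = if j = i then 2000 else dpAt dp j := by
              intro j hj
              rw [hset]
              exact dpAt_set dp i j 2000 hin.1 hj hilen
            refine ⟨⟨fun h => absurd h (by simp), fun h => absurd h hnex⟩, ?_, ?_, ?_, ?_,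
              fun h => absurd h (by simp), fun j hj => hj⟩
            · exact InvS_set_bad n arr dp vis ans i hInv hin (Or.inl hd0) hnex
            · intro j hj
              by_cases h : j = i
              · subst h
                left
                rw [hat j (hInv.visR j hj).1, if_pos rfl]
                omega
              · rcases hvis j hj with h1 | h1
                · left
                  rw [hat j (hInv.visR j hj).1, if_neg h]
                  exact h1
                · right; exact h1
            · intro j hj h1
              by_cases h : j = i
              · subst h; exact hivis
              · rw [hat j hj.1, if_neg h] at h1
                exact hdec j hj h1
            · intro p hp
              have hpr := hInv.visR p (hP p hp).1
              by_cases h : p = i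
              · subst h
                right
                rw [hat p hpr.1, if_pos rfl]
              · left
                rw [hat p hpr.1, if_neg h]
                exact (hP p hp).2
          · -- fresh index: add to vis, recurse on i + arr[i]
            have hnotvis : i ∉ vis := fun h => c4 ((PySem.Set.contains_iff vis i).mpr h)
            have hgs : gstepG n arr i = i + PySem.List.pyGetD arr i 0 := by
              unfold gstepG
              rw [if_neg (by omega)]
            have hvadd : PySem.Set.add vis i = vis ++ [i] := PySem.Set.add_of_not_mem hnotvis
            have hInv2 : InvS n arr dp (PySem.Set.add vis i) ans :=
              ⟨hInv.len, PySem.Set.nodup_add vis i hInv.nodup,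
               fun j hj => by
                 rcases (PySem.Set.mem_add vis i j).mp hj with h | rfl
                 · exact hInv.visR j h
                 · exact hin,
               hInv.tri, hInv.one, hInv.bad, hInv.cnt⟩
            have hch2 : ChainG n arr (P ++ [i]) (i + PySem.List.pyGetD arr i 0) := by
              rw [← hgs]
              exact chain_snoc n arr P i hch hin
            have hP2 : ∀ p ∈ P ++ [i], p ∈ PySem.Set.add vis i ∧ dpAt dp p = 0 := by
              intro p hp
              rcases List.mem_append.mp hp with h | h
              · exact ⟨(PySem.Set.mem_add vis i p).mpr (Or.inl (hP p h).1), (hP p h).2⟩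
              · rw [List.mem_singleton] at h
                exact ⟨(PySem.Set.mem_add vis i p).mpr (Or.inr h), h ▸ hd0⟩
            have hvis2 : ∀ j ∈ PySem.Set.add vis i, dpAt dp j ≠ 0 ∨ j ∈ P ++ [i] := by
              intro j hj
              rcases (PySem.Set.mem_add vis i j).mp hj with h | rfl
              · rcases hvis j h with h1 | h1
                · exact Or.inl h1
                · exact Or.inr (List.mem_append.mpr (Or.inl h1))
              · exact Or.inr (List.mem_append.mpr (Or.inr (List.mem_singleton.mpr rfl)))
            have hdec2 : ∀ j, inRangeG n j → dpAt dp j ≠ 0 → j ∈ PySem.Set.add vis i :=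
              fun j hj h1 => (PySem.Set.mem_add vis i j).mpr (Or.inl (hdec j hj h1))
            have hfuel2 : n.toNat + 1 ≤ fuel + (PySem.Set.add vis i).length := by
              rw [hvadd]
              simp only [List.length_append, List.length_singleton]
              omega
            have hpost := ih (i + PySem.List.pyGetD arr i 0) dp (PySem.Set.add vis i) ans
              (P ++ [i]) hInv2 hch2 hP2 hvis2 hdec2 hfuel2
            rcases hres : goodA arr n fuel (i + PySem.List.pyGetD arr i 0)
                (dp, PySem.Set.add vis i, ans) with ⟨b, dp', vis', ans'⟩
            rw [hres] at hpost
            simp only [PostG] at hpost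
            obtain ⟨hIff, hInv', hvis', hdec', hP5, hP6, hmono⟩ := hpost
            have hilen' : i.toNat < dp'.length := by
              rw [hInv'.len]
              unfold inRangeG at hin
              omega
            have hiPi : i ∈ P ++ [i] := List.mem_append.mpr (Or.inr (List.mem_singleton.mpr rfl))
            have hmono2 : ∀ j ∈ vis, j ∈ vis' :=
              fun j hj => hmono j ((PySem.Set.mem_add vis i j).mpr (Or.inl hj))
            have hivis' : i ∈ vis' := hmono i ((PySem.Set.mem_add vis i i).mpr (Or.inr rfl))
            have hPne : ∀ p ∈ P, p ≠ i := by
              intro p hp he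
              exact hnotvis (he ▸ (hP p hp).1)
            cases b with
            | true =>
              have hgA : goodA arr n (Nat.succ fuel) i (dp, vis, ans) =
                  (true, (PySem.List.pySetD dp' i 1, vis', ans' + 1)) := by
                simp only [goodA]
                rw [if_neg c1, if_neg c2, if_neg c3, if_neg c4, hres]
              rw [hgA]
              unfold PostG
              dsimp only
              have hexj : ExitsP n arr (i + PySem.List.pyGetD arr i 0) := hIff.mp rfl
              have hexi : ExitsP n arr i := (exits_gstep n arr i).mpr (by rwa [hgs])
              have hi0' : dpAt dp' i = 0 := hP6 rfl i hiPi
              have hset : PySem.List.pySetD dp' i 1 = dp'.set i.toNat 1 :=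
                PySem.List.pySetD_of_nonneg dp' 1 hin.1
              have hat : ∀ j : Int, 0 ≤ j →
                  dpAt (PySem.List.pySetD dp' i 1) j = if j = i then 1 else dpAt dp' j := by
                intro j hj
                rw [hset]
                exact dpAt_set dp' i j 1 hin.1 hj hilen'
              refine ⟨⟨fun _ => hexi, fun _ => rfl⟩, ?_, ?_, ?_, ?_, ?_, hmono2⟩
              · exact InvS_set_one n arr dp' vis' ans' i hInv' hin hi0' hexi
              · intro j hj
                by_cases h : j = i
                · subst h
                  left
                  rw [hat j (hInv'.visR j hj).1, if_pos rfl]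
                  omega
                · rcases hvis' j hj with h1 | h1
                  · left
                    rw [hat j (hInv'.visR j hj).1, if_neg h]
                    exact h1
                  · rcases List.mem_append.mp h1 with h2 | h2
                    · right; exact h2
                    · rw [List.mem_singleton] at h2
                      exact absurd h2 h
              · intro j hj h1
                by_cases h : j = i
                · subst h; exact hivis'
                · rw [hat j hj.1, if_neg h] at h1
                  exact hdec' j hj h1
              · intro p hp
                left
                have hpr := hInv.visR p (hP p hp).1
                rw [hat p hpr.1, if_neg (hPne p hp)]
                exact hP6 rfl p (List.mem_append.mpr (Or.inl hp))
              · intro _ p hp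
                have hpr := hInv.visR p (hP p hp).1
                rw [hat p hpr.1, if_neg (hPne p hp)]
                exact hP6 rfl p (List.mem_append.mpr (Or.inl hp))
            | false =>
              have hgA : goodA arr n (Nat.succ fuel) i (dp, vis, ans) =
                  (false, (PySem.List.pySetD dp' i 2000, vis', ans')) := by
                simp only [goodA]
                rw [if_neg c1, if_neg c2, if_neg c3, if_neg c4, hres]
              rw [hgA]
              unfold PostG
              dsimp only
              have hnexj : ¬ ExitsP n arr (i + PySem.List.pyGetD arr i 0) := by
                intro h
                exact absurd (hIff.mpr h) (by simp)
              have hnexi : ¬ ExitsP n arr i := by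
                intro h
                exact hnexj (by rw [← hgs]; exact (exits_gstep n arr i).mp h)
              have hi0' : dpAt dp' i = 0 ∨ dpAt dp' i = 2000 := hP5 i hiPi
              have hset : PySem.List.pySetD dp' i 2000 = dp'.set i.toNat 2000 :=
                PySem.List.pySetD_of_nonneg dp' 2000 hin.1
              have hat : ∀ j : Int, 0 ≤ j →
                  dpAt (PySem.List.pySetD dp' i 2000) j = if j = i then 2000 else dpAt dp' j := by
                intro j hj
                rw [hset]
                exact dpAt_set dp' i j 2000 hin.1 hj hilen'
              refine ⟨⟨fun h => absurd h (by simp), fun h => absurd h hnexi⟩, ?_, ?_, ?_, ?_,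
                fun h => absurd h (by simp), hmono2⟩
              · exact InvS_set_bad n arr dp' vis' ans' i hInv' hin hi0' hnexi
              · intro j hj
                by_cases h : j = i
                · subst h
                  left
                  rw [hat j (hInv'.visR j hj).1, if_pos rfl]
                  omega
                · rcases hvis' j hj with h1 | h1
                  · left
                    rw [hat j (hInv'.visR j hj).1, if_neg h]
                    exact h1
                  · rcases List.mem_append.mp h1 with h2 | h2
                    · right; exact h2
                    · rw [List.mem_singleton] at h2
                      exact absurd h2 h
              · intro j hj h1
                by_cases h : j = i
                · subst h; exact hivis'
                · rw [hat j hj.1, if_neg h] at h1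
                  exact hdec' j hj h1
              · intro p hp
                have hpr := hInv.visR p (hP p hp).1
                rw [hat p hpr.1, if_neg (hPne p hp)]
                exact hP5 p (List.mem_append.mpr (Or.inl hp))

-- A's loop body, named (definitionally equal to the literal lambda in goodStones) to state the loop lemma
def stepA (n : Int) (arr : List Int) (st : List Int × PySem.Set Int × Int) (i : Int) :
    List Int × PySem.Set Int × Int :=
  match st with
  | (dp, vis, ans) =>
    if PySem.Set.contains vis i then (dp, vis, ans)
    else
      match goodA arr n (n.toNat + 1) (i + PySem.List.pyGetD arr i 0)
          (dp, PySem.Set.add vis i, ans) with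
      | (true, (dp', vis', ans')) => (PySem.List.pySetD dp' i 1, vis', ans' + 1)
      | (false, (dp', vis', ans')) => (PySem.List.pySetD dp' i 2000, vis', ans')

lemma loop_post (n : Int) (arr : List Int) :
    ∀ (l : List Int) (dp : List Int) (vis : PySem.Set Int) (ans : Int),
    (∀ i ∈ l, inRangeG n i) →
    InvS n arr dp vis ans →
    (∀ j ∈ vis, dpAt dp j ≠ 0) →
    (∀ j, inRangeG n j → dpAt dp j ≠ 0 → j ∈ vis) →
    InvS n arr (l.foldl (stepA n arr) (dp, vis, ans)).1
        (l.foldl (stepA n arr) (dp, vis, ans)).2.1 (l.foldl (stepA n arr) (dp, vis, ans)).2.2 ∧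
    (∀ j ∈ (l.foldl (stepA n arr) (dp, vis, ans)).2.1,
        dpAt (l.foldl (stepA n arr) (dp, vis, ans)).1 j ≠ 0) ∧
    (∀ j, inRangeG n j → dpAt (l.foldl (stepA n arr) (dp, vis, ans)).1 j ≠ 0 →
        j ∈ (l.foldl (stepA n arr) (dp, vis, ans)).2.1) ∧
    (∀ i ∈ l, i ∈ (l.foldl (stepA n arr) (dp, vis, ans)).2.1) ∧
    (∀ j ∈ vis, j ∈ (l.foldl (stepA n arr) (dp, vis, ans)).2.1) := by
  intro l
  induction l with
  | nil =>
    intro dp vis ans hl hInv hvis hdec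
    exact ⟨hInv, hvis, hdec, fun i hi => absurd hi (by simp), fun j hj => hj⟩
  | cons i l ihl =>
    intro dp vis ans hl hInv hvis hdec
    rw [List.foldl_cons]
    have hin : inRangeG n i := hl i List.mem_cons_self
    by_cases c : PySem.Set.contains vis i = true
    · -- i already visited (hence already decided): the loop body skips it
      have hstep : stepA n arr (dp, vis, ans) i = (dp, vis, ans) := by
        simp only [stepA]
        rw [if_pos c]
      rw [hstep]
      have hres := ihl dp vis ans (fun x hx => hl x (List.mem_cons_of_mem _ hx)) hInv hvis hdec
      refine ⟨hres.1, hres.2.1, hres.2.2.1, ?_, hres.2.2.2.2⟩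
      intro x hx
      rcases List.mem_cons.mp hx with rfl | hx'
      · exact hres.2.2.2.2 x ((PySem.Set.contains_iff vis x).mp c)
      · exact hres.2.2.2.1 x hx'
    · -- fresh i: vis.add(i), then the recursive good() on i + arr[i]
      have hnot : i ∉ vis := fun h => c ((PySem.Set.contains_iff vis i).mpr h)
      have hd0 : dpAt dp i = 0 := by
        by_contra h
        exact hnot (hdec i hin h)
      have hgs : gstepG n arr i = i + PySem.List.pyGetD arr i 0 := by
        unfold gstepG
        unfold inRangeG at hin
        rw [if_neg (by omega)]
      have hInv2 : InvS n arr dp (PySem.Set.add vis i) ans :=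
        ⟨hInv.len, PySem.Set.nodup_add vis i hInv.nodup,
         fun j hj => by
           rcases (PySem.Set.mem_add vis i j).mp hj with h | rfl
           · exact hInv.visR j h
           · exact hin,
         hInv.tri, hInv.one, hInv.bad, hInv.cnt⟩
      have hch2 : ChainG n arr [i] (i + PySem.List.pyGetD arr i 0) := by
        rw [← hgs]
        exact ChainG.single i _ hin rfl
      have hpost := goodA_post n arr (n.toNat + 1) (i + PySem.List.pyGetD arr i 0) dp
        (PySem.Set.add vis i) ans [i] hInv2 hch2
        (fun p hp => by
          rw [List.mem_singleton] at hp
          exact ⟨(PySem.Set.mem_add vis i p).mpr (Or.inr hp), hp ▸ hd0⟩)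
        (fun j hj => by
          rcases (PySem.Set.mem_add vis i j).mp hj with h | rfl
          · exact Or.inl (hvis j h)
          · exact Or.inr (List.mem_singleton.mpr rfl))
        (fun j hj h1 => (PySem.Set.mem_add vis i j).mpr (Or.inl (hdec j hj h1)))
        (by omega)
      rcases hres : goodA arr n (n.toNat + 1) (i + PySem.List.pyGetD arr i 0)
          (dp, PySem.Set.add vis i, ans) with ⟨b, dp', vis', ans'⟩
      rw [hres] at hpost
      unfold PostG at hpost
      dsimp only at hpost
      obtain ⟨hIff, hInv', hvis', hdec', hP5, hP6, hmono⟩ := hpost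
      have hilen' : i.toNat < dp'.length := by
        rw [hInv'.len]
        unfold inRangeG at hin
        omega
      have hivis' : i ∈ vis' := hmono i ((PySem.Set.mem_add vis i i).mpr (Or.inr rfl))
      have hmono2 : ∀ j ∈ vis, j ∈ vis' :=
        fun j hj => hmono j ((PySem.Set.mem_add vis i j).mpr (Or.inl hj))
      cases b with
      | true =>
        have hstep : stepA n arr (dp, vis, ans) i = (PySem.List.pySetD dp' i 1, vis', ans' + 1) := by
          simp only [stepA]
          rw [if_neg c, hres]
        rw [hstep]
        have hexi : ExitsP n arr i := (exits_gstep n arr i).mpr (by rw [hgs]; exact hIff.mp rfl)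
        have hi0' : dpAt dp' i = 0 := hP6 rfl i (List.mem_singleton.mpr rfl)
        have hat : ∀ j : Int, 0 ≤ j →
            dpAt (PySem.List.pySetD dp' i 1) j = if j = i then 1 else dpAt dp' j :=
          fun j hj => dpAt_pySetD dp' i j 1 hin.1 hilen' hj
        have hInvN : InvS n arr (PySem.List.pySetD dp' i 1) vis' (ans' + 1) :=
          InvS_set_one n arr dp' vis' ans' i hInv' hin hi0' hexi
        have hvisN : ∀ j ∈ vis', dpAt (PySem.List.pySetD dp' i 1) j ≠ 0 := by
          intro j hj
          by_cases h : j = i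
          · rw [hat j (hInv'.visR j hj).1, if_pos h]
            omega
          · rw [hat j (hInv'.visR j hj).1, if_neg h]
            rcases hvis' j hj with h1 | h1
            · exact h1
            · rw [List.mem_singleton] at h1
              exact absurd h1 h
        have hdecN : ∀ j, inRangeG n j → dpAt (PySem.List.pySetD dp' i 1) j ≠ 0 → j ∈ vis' := by
          intro j hj h1
          by_cases h : j = i
          · subst h; exact hivis'
          · rw [hat j hj.1, if_neg h] at h1
            exact hdec' j hj h1
        have hres2 := ihl (PySem.List.pySetD dp' i 1) vis' (ans' + 1)
          (fun x hx => hl x (List.mem_cons_of_mem _ hx)) hInvN hvisN hdecN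
        refine ⟨hres2.1, hres2.2.1, hres2.2.2.1, ?_, fun j hj => hres2.2.2.2.2 j (hmono2 j hj)⟩
        intro x hx
        rcases List.mem_cons.mp hx with rfl | hx'
        · exact hres2.2.2.2.2 x hivis'
        · exact hres2.2.2.2.1 x hx'
      | false =>
        have hstep : stepA n arr (dp, vis, ans) i = (PySem.List.pySetD dp' i 2000, vis', ans') := by
          simp only [stepA]
          rw [if_neg c, hres]
        rw [hstep]
        have hnexi : ¬ ExitsP n arr i := by
          intro h
          have h2 := (exits_gstep n arr i).mp h
          rw [hgs] at h2
          exact absurd (hIff.mpr h2) (by simp)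
        have hi0' : dpAt dp' i = 0 ∨ dpAt dp' i = 2000 := hP5 i (List.mem_singleton.mpr rfl)
        have hat : ∀ j : Int, 0 ≤ j →
            dpAt (PySem.List.pySetD dp' i 2000) j = if j = i then 2000 else dpAt dp' j :=
          fun j hj => dpAt_pySetD dp' i j 2000 hin.1 hilen' hj
        have hInvN : InvS n arr (PySem.List.pySetD dp' i 2000) vis' ans' :=
          InvS_set_bad n arr dp' vis' ans' i hInv' hin hi0' hnexi
        have hvisN : ∀ j ∈ vis', dpAt (PySem.List.pySetD dp' i 2000) j ≠ 0 := by
          intro j hj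
          by_cases h : j = i
          · rw [hat j (hInv'.visR j hj).1, if_pos h]
            omega
          · rw [hat j (hInv'.visR j hj).1, if_neg h]
            rcases hvis' j hj with h1 | h1
            · exact h1
            · rw [List.mem_singleton] at h1
              exact absurd h1 h
        have hdecN : ∀ j, inRangeG n j → dpAt (PySem.List.pySetD dp' i 2000) j ≠ 0 → j ∈ vis' := by
          intro j hj h1
          by_cases h : j = i
          · subst h; exact hivis'
          · rw [hat j hj.1, if_neg h] at h1
            exact hdec' j hj h1
        have hres2 := ihl (PySem.List.pySetD dp' i 2000) vis' ans'
          (fun x hx => hl x (List.mem_cons_of_mem _ hx)) hInvN hvisN hdecN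
        refine ⟨hres2.1, hres2.2.1, hres2.2.2.1, ?_, fun j hj => hres2.2.2.2.2 j (hmono2 j hj)⟩
        intro x hx
        rcases List.mem_cons.mp hx with rfl | hx'
        · exact hres2.2.2.2.2 x hivis'
        · exact hres2.2.2.2.1 x hx'

lemma pyGetD_all_eq (xs : List Int) (j d : Int) (h : ∀ x ∈ xs, x = d) :
    PySem.List.pyGetD xs j d = d := by
  cases h2 : PySem.List.pyGet? xs j with
  | none => exact PySem.List.pyGetD_of_none xs j d h2
  | some a =>
    have hmem := PySem.List.mem_of_pyGet?_eq_some xs h2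
    simp [PySem.List.pyGetD, h2, h a hmem]

-- ===== VERDICT (by name: the statement is the Claim_ definition above) =====
theorem goodStones_spec : Claim_equal_goodStones := by
  intro n arr _hDom _hPre
  unfold Spec_goodStones
  have hA : goodStones n arr =
      ((PySem.List.pyRange 0 n 1).foldl (stepA n arr)
        ((PySem.List.pyRange 0 n 1).map (fun _ => (0 : Int)), PySem.Set.empty, 0)).2.2 := rfl
  set dp0 : List Int := (PySem.List.pyRange 0 n 1).map (fun _ => (0 : Int)) with hdp0
  have hdp0at : ∀ j : Int, dpAt dp0 j = 0 := by
    intro j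
    apply pyGetD_all_eq
    intro x hx
    rw [hdp0] at hx
    obtain ⟨y, _, rfl⟩ := List.mem_map.mp hx
    rfl
  have hInv0 : InvS n arr dp0 PySem.Set.empty 0 := by
    refine ⟨?_, List.nodup_nil, fun j hj => absurd hj (by simp [PySem.Set.empty]),
      fun j _ => Or.inl (hdp0at j), ?_, ?_, ?_⟩
    · rw [hdp0, List.length_map, PySem.List.length_pyRange_one]
      omega
    · intro j _ h1
      rw [hdp0at j] at h1
      omega
    · intro j _ h1
      rw [hdp0at j] at h1
      omega
    · have hz : (PySem.List.pyRange 0 n 1).countP (fun j => dpAt dp0 j == 1) = 0 :=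
        List.countP_eq_zero.mpr (fun j _ => by simp [hdp0at j])
      simp [hz]
  obtain ⟨hInvF, hvisF, _hdecF, hallF, _⟩ :=
    loop_post n arr (PySem.List.pyRange 0 n 1) dp0 PySem.Set.empty 0
      (fun i hi => by
        have := PySem.List.mem_pyRange_one.mp hi
        exact ⟨this.1, this.2⟩)
      hInv0
      (fun j hj => absurd hj (by simp [PySem.Set.empty]))
      (fun j _ h => absurd (hdp0at j) h)
  rw [hA, hInvF.cnt]
  have hBval : goodStones_alt n arr =
      (((PySem.List.pyRange 0 n 1).countP (fun i =>
        decide (chaseB n arr n.toNat (i + PySem.List.pyGetD arr i 0) < 0 ∨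
          n ≤ chaseB n arr n.toNat (i + PySem.List.pyGetD arr i 0))) : Nat) : Int) := by
    unfold goodStones_alt
    have hfe : (fun (count : Int) (i : Int) =>
        let j := chaseB n arr n.toNat (i + PySem.List.pyGetD arr i 0)
        if j < 0 ∨ n ≤ j then count + 1 else count) =
        (fun (count : Int) (i : Int) =>
          if (fun i => decide (chaseB n arr n.toNat (i + PySem.List.pyGetD arr i 0) < 0 ∨
              n ≤ chaseB n arr n.toNat (i + PySem.List.pyGetD arr i 0))) i = true
          then count + 1 else count) := by
      funext count i
      simp
    rw [hfe, PySem.List.foldl_count_if]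
    simp
  rw [hBval]
  congr 1
  apply List.countP_congr
  intro i hi
  have hiR : inRangeG n i := by
    have := PySem.List.mem_pyRange_one.mp hi
    exact ⟨this.1, this.2⟩
  have hgs : gstepG n arr i = i + PySem.List.pyGetD arr i 0 := by
    unfold gstepG
    unfold inRangeG at hiR
    rw [if_neg (by omega)]
  have hiff1 : dpAt ((PySem.List.pyRange 0 n 1).foldl (stepA n arr)
      (dp0, PySem.Set.empty, 0)).1 i = 1 ↔ ExitsP n arr i := by
    have hdec1 := hvisF i (hallF i hi)
    rcases hInvF.tri i hiR with h0 | h1 | h2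
    · exact absurd h0 hdec1
    · exact ⟨fun _ => hInvF.one i hiR h1, fun _ => h1⟩
    · refine ⟨fun h => by omega, fun hex => absurd hex (hInvF.bad i hiR h2)⟩
  have hiff2 : (chaseB n arr n.toNat (i + PySem.List.pyGetD arr i 0) < 0 ∨
      n ≤ chaseB n arr n.toNat (i + PySem.List.pyGetD arr i 0)) ↔ ExitsP n arr i := by
    rw [chase_eq_iter n arr n.toNat (i + PySem.List.pyGetD arr i 0), ← hgs]
    have hb := exits_iff_bounded n arr (gstepG n arr i)
    have hg := exits_gstep n arr i
    constructor
    · intro hcond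
      exact hg.mpr (hb.mpr (by unfold inRangeG; omega))
    · intro hex
      have := hb.mp (hg.mp hex)
      unfold inRangeG at this
      omega
  simp only [beq_iff_eq, decide_eq_true_eq]
  rw [hiff1, hiff2]
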